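-- pv_equiv track=rewrite | github.com/HamzahChariwala/Brainf-k | main.py | best_single_value_code
-- ===== SOURCE A (Python) =====
-- def best_single_value_code(m):
--
--     best_code = ">" + ("+" * m)
--     best_len = 1 + m
--
--     for a in range(2, m):
--         if m % a == 0:
--             b = m // a
--             loop_code = (
--                 "+" * a
--                 + "[>"
--                 + "+" * b
--                 + "<-]"
--                 + ">"
--             )
--             code_len = a + b + 6
--             if code_len < best_len:
--                 best_len = code_len
--                 best_code = loop_code
--
--     return str(best_code)
-- ===== SOURCE B (Python) =====
-- def best_single_value_code(m):
--     base = ">" + "+" * m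
--     best = None
--     a = 2
--     while a * a <= m:
--         if m % a == 0:
--             best = a
--         a += 1
--     if best is None:
--         return base
--     b = m // best
--     if best + b + 6 < m + 1:
--         return "+" * best + "[>" + "+" * b + "<-]" + ">"
--     return base
-- ===== Notes on version B (the rewrite author's own statement) =====
-- stated objective: faster
-- what changed: Instead of scanning all a in range(2,m) and keeping a running best, B scans divisors only up to sqrt(m), keeps the largest divisor a <= sqrt(m) (whose pair minimizes a+b), and compares that single candidate against the baseline.
import Mathlib
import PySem

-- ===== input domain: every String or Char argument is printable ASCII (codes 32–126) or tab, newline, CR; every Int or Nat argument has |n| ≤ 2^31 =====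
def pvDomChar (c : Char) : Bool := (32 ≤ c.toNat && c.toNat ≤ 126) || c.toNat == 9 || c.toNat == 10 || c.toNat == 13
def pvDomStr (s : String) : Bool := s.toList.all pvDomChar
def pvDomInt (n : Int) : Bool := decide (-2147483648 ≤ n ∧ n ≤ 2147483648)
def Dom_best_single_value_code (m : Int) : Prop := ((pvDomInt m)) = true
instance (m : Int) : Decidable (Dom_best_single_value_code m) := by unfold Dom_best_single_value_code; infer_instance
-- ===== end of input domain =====

-- B scans divisors only up to sqrt(m) (O(sqrt m) instead of A's O(m) scan); return values proved equal for all m.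

-- '+' * n  (Python: empty for n ≤ 0)
def pyPlus (n : Int) : List Char := List.replicate n.toNat '+'

-- ===== PORT A =====
def best_single_value_code (m : Int) : String :=
  String.ofList ((PySem.List.pyRange 2 m 1).foldl
    (fun (s : List Char × Int) a =>
      if PySem.Int.mod m a = 0 then
        let b := PySem.Int.floordiv m a
        let loop_code := pyPlus a ++ ['[', '>'] ++ pyPlus b ++ ['<', '-', ']', '>']
        let code_len := a + b + 6
        if code_len < s.2 then (loop_code, code_len) else s
      else s)
    ('>' :: pyPlus m, 1 + m)).1

-- ===== PORT B =====
-- while a*a <= m: remember the last divisor seen (= largest divisor ≤ sqrt m)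
def altScanB (m a : Int) (best : Option Int) : Option Int :=
  if a * a ≤ m then
    altScanB m (a + 1) (if PySem.Int.mod m a = 0 then some a else best)
  else best
termination_by (m + 1 - a).toNat
decreasing_by
  have ha : a ≤ m := by nlinarith
  omega

def best_single_value_code_alt (m : Int) : String :=
  match altScanB m 2 none with
  | none => String.ofList ('>' :: pyPlus m)
  | some a =>
      let b := PySem.Int.floordiv m a
      if a + b + 6 < m + 1 then
        String.ofList (pyPlus a ++ ['[', '>'] ++ pyPlus b ++ ['<', '-', ']', '>'])
      else String.ofList ('>' :: pyPlus m)

-- ===== PRECONDITION & SPEC =====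
def Spec_best_single_value_code (m : Int) (out : String) : Prop := out = best_single_value_code_alt m
instance (m : Int) (out : String) : Decidable (Spec_best_single_value_code m out) := by unfold Spec_best_single_value_code; infer_instance

-- ===== CLAIM (what is proved, stated in full; the proofs are below) =====
def Claim_equal_best_single_value_code : Prop := ∀ (m : Int), Dom_best_single_value_code m → Spec_best_single_value_code m (best_single_value_code m)

-- ===== LEMMAS AND PROOFS =====

-- the loop body of A's fold, named for the proofs
def stepA (m : Int) (s : List Char × Int) (a : Int) : List Char × Int :=
  if PySem.Int.mod m a = 0 then
    let b := PySem.Int.floordiv m a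
    let loop_code := pyPlus a ++ ['[', '>'] ++ pyPlus b ++ ['<', '-', ']', '>']
    let code_len := a + b + 6
    if code_len < s.2 then (loop_code, code_len) else s
  else s

def loopC (m d : Int) : List Char :=
  pyPlus d ++ ['[', '>'] ++ pyPlus (PySem.Int.floordiv m d) ++ ['<', '-', ']', '>']

def fLen (m d : Int) : Int := d + PySem.Int.floordiv m d + 6

-- largest d with 2 ≤ d ≤ k, d ∣ m, d*d ≤ m
def mdiv (m k : Int) : Option Int :=
  if k < 2 then none
  else if k ∣ m ∧ k * k ≤ m then some k else mdiv m (k - 1)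
termination_by k.toNat
decreasing_by omega

-- the state of A's fold after processing 2..k, as predicted by mdiv
def stateOf (m k : Int) : List Char × Int :=
  match mdiv m k with
  | some d => if fLen m d < 1 + m then (loopC m d, fLen m d) else ('>' :: pyPlus m, 1 + m)
  | none => ('>' :: pyPlus m, 1 + m)

lemma mdiv_neg {m k : Int} (h : k < 2) : mdiv m k = none := by
  rw [mdiv]; simp [h]

lemma mdiv_hit {m k : Int} (h2 : ¬ k < 2) (h : k ∣ m ∧ k * k ≤ m) : mdiv m k = some k := by
  rw [mdiv]; simp [h2, h]

lemma mdiv_skip {m k : Int} (h2 : ¬ k < 2) (h : ¬ (k ∣ m ∧ k * k ≤ m)) : mdiv m k = mdiv m (k - 1) := by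
  rw [mdiv]; simp [h2, h]

lemma mdiv_sound {m : Int} : ∀ (n : Nat) (k : Int), k.toNat ≤ n → ∀ d, mdiv m k = some d →
    2 ≤ d ∧ d ≤ k ∧ d ∣ m ∧ d * d ≤ m := by
  intro n
  induction n with
  | zero =>
      intro k hk d hd
      have h2 : k < 2 := by omega
      rw [mdiv_neg h2] at hd; exact absurd hd (by simp)
  | succ n ih =>
      intro k hk d hd
      by_cases h2 : k < 2
      · rw [mdiv_neg h2] at hd; exact absurd hd (by simp)
      · by_cases h : k ∣ m ∧ k * k ≤ m
        · rw [mdiv_hit h2 h] at hd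
          obtain rfl : k = d := by simpa using hd
          exact ⟨by omega, le_refl _, h.1, h.2⟩
        · rw [mdiv_skip h2 h] at hd
          obtain ⟨a1, a2, a3, a4⟩ := ih (k - 1) (by omega) d hd
          exact ⟨a1, by omega, a3, a4⟩

lemma mdiv_max {m : Int} : ∀ (n : Nat) (k : Int), k.toNat ≤ n →
    ∀ c, 2 ≤ c → c ≤ k → c ∣ m → c * c ≤ m →
    ∃ d, mdiv m k = some d ∧ c ≤ d := by
  intro n
  induction n with
  | zero => intro k hk c hc1 hc2 _ _; omega
  | succ n ih =>
      intro k hk c hc1 hc2 hc3 hc4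
      have h2 : ¬ k < 2 := by omega
      by_cases h : k ∣ m ∧ k * k ≤ m
      · exact ⟨k, mdiv_hit h2 h, hc2⟩
      · have hck : c ≠ k := by rintro rfl; exact h ⟨hc3, hc4⟩
        obtain ⟨d, hd, hcd⟩ := ih (k - 1) (by omega) c hc1 (by omega) hc3 hc4
        exact ⟨d, by rw [mdiv_skip h2 h]; exact hd, hcd⟩

lemma mdiv_stable {m : Int} : ∀ (n : Nat) (j k : Int), (k - j).toNat ≤ n → j ≤ k →
    (∀ d, j < d → d ≤ k → 2 ≤ d → ¬ d * d ≤ m) → mdiv m k = mdiv m j := by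
  intro n
  induction n with
  | zero =>
      intro j k hn hjk _
      obtain rfl : j = k := by omega
      rfl
  | succ n ih =>
      intro j k hn hjk hno
      rcases eq_or_lt_of_le hjk with rfl | hlt
      · rfl
      · by_cases h2 : k < 2
        · rw [mdiv_neg h2, mdiv_neg (by omega)]
        · have hk : ¬ (k ∣ m ∧ k * k ≤ m) := by
            rintro ⟨_, hsq⟩; exact hno k hlt le_rfl (by omega) hsq
          rw [mdiv_skip h2 hk]
          exact ih j (k - 1) (by omega) (by omega) (fun d h1 h3 h4 => hno d h1 (by omega) h4)

-- sum of a divisor pair strictly shrinks as the small divisor grows (below sqrt)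
lemma pair_anti {m d e cd ce : Int} (hd2 : 2 ≤ d) (hde : d < e)
    (hcd : d * cd = m) (hce : e * ce = m) (hee : e * e ≤ m) : e + ce < d + cd := by
  have hkey : d * e * ((d + cd) - (e + ce)) = (e - d) * (m - d * e) := by
    linear_combination e * hcd - d * hce
  have h1 : (0 : Int) < e - d := by omega
  have h2 : (0 : Int) < m - d * e := by nlinarith
  have hde' : (0 : Int) < d * e := by nlinarith
  have hpos : 0 < d * e * ((d + cd) - (e + ce)) := by rw [hkey]; exact mul_pos h1 h2
  nlinarith [hpos, hde']

lemma floordiv_exact {m d : Int} (hd : d ≠ 0) (h : d ∣ m) : d * PySem.Int.floordiv m d = m := by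
  have h1 := PySem.Int.floordiv_mul_add_mod m d
  have h2 : PySem.Int.mod m d = 0 := (PySem.Int.mod_eq_zero_iff_dvd m d).2 h
  rw [h2, add_zero] at h1
  linarith [h1, mul_comm (PySem.Int.floordiv m d) d]

-- one fold step matches the mdiv prediction
lemma stepA_eq (m : Int) (s : List Char × Int) (k : Int) :
    stepA m s k = if PySem.Int.mod m k = 0
      then (if fLen m k < s.2 then (loopC m k, fLen m k) else s) else s := rfl

lemma step_state {m k : Int} (h2 : 2 ≤ k) (hkm : k < m) :
    stepA m (stateOf m (k - 1)) k = stateOf m k := by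
  have hk2 : ¬ k < 2 := by omega
  by_cases hdvd : k ∣ m
  · have hmod : PySem.Int.mod m k = 0 := (PySem.Int.mod_eq_zero_iff_dvd m k).2 hdvd
    by_cases hsq : k * k ≤ m
    · -- k is a new, better candidate
      simp only [stateOf]
      rw [mdiv_hit hk2 ⟨hdvd, hsq⟩]
      rcases hprev : mdiv m (k - 1) with _ | d
      · simp only [stepA_eq, if_pos hmod]
      · obtain ⟨hd2, hdk, hddvd, hdsq⟩ := mdiv_sound (k - 1).toNat (k - 1) le_rfl d hprev
        have hfk : fLen m k < fLen m d := by
          have e1 := floordiv_exact (by omega : d ≠ 0) hddvd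
          have e2 := floordiv_exact (by omega : k ≠ 0) hdvd
          have := pair_anti hd2 (by omega : d < k) e1 e2 hsq
          simp only [fLen]; omega
        simp only [stepA_eq, if_pos hmod]
        by_cases hfd : fLen m d < 1 + m
        · rw [if_pos hfd]
          simp only []
          rw [if_pos hfk, if_pos (by omega : fLen m k < 1 + m)]
        · rw [if_neg hfd]
    · -- k is above sqrt: its partner c = m/k was already seen and is at least as good
      simp only [stateOf]
      rw [mdiv_skip hk2 (by tauto)]
      set c := PySem.Int.floordiv m k with hc
      have hm3 : 3 ≤ m := by omega
      have hkc : k * c = m := floordiv_exact (by omega : k ≠ 0) hdvd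
      have hc2 : 2 ≤ c := by
        by_contra hcon
        have h1 : c ≤ 1 := by omega
        have h2 : k * c ≤ k * 1 := mul_le_mul_of_nonneg_left h1 (by omega)
        rw [mul_one] at h2
        linarith [hkc]
      have hck : c < k := by nlinarith
      have hcsq : c * c ≤ m := by nlinarith
      have hcdvd : c ∣ m := ⟨k, by linarith [mul_comm k c, hkc]⟩
      obtain ⟨d, hd, hcd⟩ := mdiv_max (k - 1).toNat (k - 1) le_rfl c hc2 (by omega) hcdvd hcsq
      obtain ⟨hd2, hdk, hddvd, hdsq⟩ := mdiv_sound (k - 1).toNat (k - 1) le_rfl d hd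
      have hfck : fLen m c = fLen m k := by
        have e1 : c * PySem.Int.floordiv m c = m := floordiv_exact (by omega : c ≠ 0) hcdvd
        have hcf : PySem.Int.floordiv m c = k := by
          have : c * PySem.Int.floordiv m c = c * k := by rw [e1]; linarith [mul_comm k c, hkc]
          exact mul_left_cancel₀ (by omega : c ≠ 0) this
        simp only [fLen, hcf]; omega
      have hfd : fLen m d ≤ fLen m k := by
        rcases eq_or_lt_of_le hcd with rfl | hlt
        · omega
        · have e1 := floordiv_exact (by omega : c ≠ 0) hcdvd
          have e2 := floordiv_exact (by omega : d ≠ 0) hddvd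
          have := pair_anti hc2 hlt e1 e2 hdsq
          simp only [fLen] at hfck ⊢; omega
      rw [hd]
      simp only [stepA_eq, if_pos hmod]
      by_cases hfdm : fLen m d < 1 + m
      · rw [if_pos hfdm]
        simp only []
        rw [if_neg (by omega)]
      · rw [if_neg hfdm]
        simp only []
        rw [if_neg (by omega)]
  · have hmod : ¬ PySem.Int.mod m k = 0 := fun h => hdvd ((PySem.Int.mod_eq_zero_iff_dvd m k).1 h)
    rw [stepA_eq, if_neg hmod]
    simp only [stateOf]
    rw [mdiv_skip hk2 (by tauto)]

lemma fold_state {m : Int} : ∀ (n : Nat) (k : Int), k = 2 + (n : Int) → k ≤ m →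
    (PySem.List.pyRange 2 k 1).foldl (stepA m) ('>' :: pyPlus m, 1 + m) = stateOf m (k - 1) := by
  intro n
  induction n with
  | zero =>
      intro k hk _
      subst hk
      rw [PySem.List.pyRange_one_eq_nil (by norm_num)]
      simp only [List.foldl_nil, stateOf]
      rw [mdiv_neg (by norm_num)]
  | succ n ih =>
      intro k hk hkm
      have hk1 : k - 1 = 2 + (n : Int) := by push_cast at hk ⊢; omega
      have hsplit : PySem.List.pyRange 2 k 1 = PySem.List.pyRange 2 (k - 1) 1 ++ [k - 1] := by
        have := PySem.List.pyRange_one_succ_right (a := 2) (b := k - 1) (by omega)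
        simpa [show k - 1 + 1 = k by ring] using this
      rw [hsplit, List.foldl_append, ih (k - 1) hk1 (by omega), List.foldl]
      have := step_state (m := m) (k := k - 1) (by omega) (by omega)
      simpa [show k - 1 - 1 = k - 2 by ring] using this

-- A's fold is literally a fold of stepA
lemma foldA_eq (m : Int) :
    best_single_value_code m = String.ofList ((PySem.List.pyRange 2 m 1).foldl (stepA m) ('>' :: pyPlus m, 1 + m)).1 := rfl

-- B's scan computes mdiv of everything below sqrt — which equals mdiv m (m-1)
lemma scan_state {m : Int} (hm : 3 ≤ m) : ∀ (n : Nat) (a : Int), 2 ≤ a → (m + 1 - a).toNat ≤ n →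
    altScanB m a (mdiv m (a - 1)) = mdiv m (m - 1) := by
  intro n
  induction n with
  | zero =>
      intro a ha hn
      have hma : m < a := by omega
      rw [altScanB, if_neg (by nlinarith)]
      refine mdiv_stable (a - 1 - (m - 1)).toNat (m - 1) (a - 1) le_rfl (by omega) ?_
      intro d h1 _ h4
      nlinarith
  | succ n ih =>
      intro a ha hn
      by_cases hsq : a * a ≤ m
      · rw [altScanB, if_pos hsq]
        have hbody : (if PySem.Int.mod m a = 0 then some a else mdiv m (a - 1)) = mdiv m a := by
          by_cases hd : a ∣ m
          · rw [if_pos ((PySem.Int.mod_eq_zero_iff_dvd m a).2 hd), mdiv_hit (by omega) ⟨hd, hsq⟩]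
          · rw [if_neg (fun h => hd ((PySem.Int.mod_eq_zero_iff_dvd m a).1 h))]
            exact (mdiv_skip (m := m) (k := a) (by omega) (by tauto)).symm
        rw [hbody]
        have ham : a ≤ m := by nlinarith
        have := ih (a + 1) (by omega) (by omega)
        simpa [show a + 1 - 1 = a by ring] using this
      · rw [altScanB, if_neg hsq]
        by_cases ham : a ≤ m
        · refine (mdiv_stable (m - 1 - (a - 1)).toNat (a - 1) (m - 1) le_rfl (by omega) ?_).symm
          intro d h1 _ h4; nlinarith
        · refine mdiv_stable (a - 1 - (m - 1)).toNat (m - 1) (a - 1) le_rfl (by omega) ?_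
          intro d h1 _ h4; nlinarith

-- ===== VERDICT (by name: the statement is the Claim_ definition above) =====
theorem best_single_value_code_spec : Claim_equal_best_single_value_code := by
  intro m _
  unfold Spec_best_single_value_code
  by_cases hm : m < 3
  · -- m ≤ 2: empty loop on both sides
    rw [foldA_eq, best_single_value_code_alt]
    rw [PySem.List.pyRange_one_eq_nil (by omega)]
    rw [altScanB, if_neg (by omega)]
    rfl
  · rw [foldA_eq, best_single_value_code_alt]
    rw [fold_state (m - 2).toNat m (by omega) le_rfl]
    have hscan : altScanB m 2 none = mdiv m (m - 1) := by
      have hm1 : mdiv m (2 - 1 : Int) = none := mdiv_neg (by norm_num)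
      have h := scan_state (by omega : (3:Int) ≤ m) (m - 1).toNat 2 le_rfl (by omega)
      rw [hm1] at h
      exact h
    rw [hscan, stateOf]
    rcases hd : mdiv m (m - 1) with _ | d
    · rfl
    · show String.ofList
          (if fLen m d < 1 + m then (loopC m d, fLen m d) else ('>' :: pyPlus m, 1 + m)).1 =
        if d + PySem.Int.floordiv m d + 6 < m + 1 then
          String.ofList (pyPlus d ++ ['[', '>'] ++ pyPlus (PySem.Int.floordiv m d) ++ ['<', '-', ']', '>'])
        else String.ofList ('>' :: pyPlus m)
      by_cases hf : fLen m d < 1 + m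
      · rw [if_pos hf, if_pos (by simp only [fLen] at hf; omega)]
        rfl
      · rw [if_neg hf, if_neg (by simp only [fLen] at hf; omega)]
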